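-- pv_equiv track=rewrite | github.com/ServiceNow/agent-poirot | web/utils.py | clean_email
-- ===== SOURCE A (Python) =====
-- def clean_email(email):
--     email = email.split("@")[0]
--     # List of special characters to remove
--     special_chars = [
--         "!",
--         "#",
--         "$",
--         "%",
--         "^",
--         "&",
--         "*",
--         "(",
--         ")",
--         "=",
--         "+",
--         "{",
--         "}",
--         "[",
--         "]",
--         "|",
--         "\\",
--         ":",
--         ";",
--         '"',
--         "'",
--         "<",
--         ">",
--         ",",
--         ".",
--         "?",
--         "/",
--         " ",
--     ]
--
--     # Iterate over each special character and replace it with an empty string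
--     for char in special_chars:
--         email = email.replace(char, "_")
--
--     return email
-- ===== SOURCE B (Python) =====
-- SPECIALS = frozenset('!#$%^&*()=+{}[]|\\:;"\'<>,.?/ ')
--
--
-- def clean_email(email):
--     local = email.split("@")[0]
--     return "".join("_" if ch in SPECIALS else ch for ch in local)
-- ===== Notes on version B (the rewrite author's own statement) =====
-- stated objective: idiomatic
-- what changed: A scans the whole string once per each of the 28 special characters (28 sequential str.replace passes); B builds a frozenset of the specials once and makes a single pass over the local part, substituting an underscore for each special character, joined back into a string.
import Mathlib
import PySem

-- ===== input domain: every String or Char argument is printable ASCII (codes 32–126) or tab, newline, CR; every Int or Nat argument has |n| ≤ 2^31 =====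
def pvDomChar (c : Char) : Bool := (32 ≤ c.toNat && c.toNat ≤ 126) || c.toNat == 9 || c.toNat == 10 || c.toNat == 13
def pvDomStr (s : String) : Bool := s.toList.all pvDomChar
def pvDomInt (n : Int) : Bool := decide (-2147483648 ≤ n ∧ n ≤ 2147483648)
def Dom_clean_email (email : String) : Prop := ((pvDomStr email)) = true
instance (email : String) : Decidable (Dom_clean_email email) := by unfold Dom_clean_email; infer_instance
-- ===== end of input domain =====

-- B replaces A's 28 sequential full-string str.replace passes by one pass over the
-- local part with a membership test in a set of the special characters (idiomatic).

-- ===== PORT A =====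
def special_chars : List String :=
  ["!", "#", "$", "%", "^", "&", "*", "(", ")", "=", "+", "{", "}", "[", "]",
   "|", "\\", ":", ";", "\"", "'", "<", ">", ",", ".", "?", "/", " "]

def clean_email (email : String) : String :=
  let email := PySem.List.pyGetD ((PySem.Str.split? email "@").getD []) 0 ""
  special_chars.foldl (fun e c => PySem.Str.replace e c "_") email

-- ===== PORT B =====
def specials_alt : PySem.Set Char :=
  PySem.Set.ofList "!#$%^&*()=+{}[]|\\:;\"'<>,.?/ ".toList

def clean_email_alt (email : String) : String :=
  let localPart := PySem.List.pyGetD ((PySem.Str.split? email "@").getD []) 0 ""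
  String.ofList (localPart.toList.map
    (fun ch => if PySem.Set.contains specials_alt ch then '_' else ch))

-- ===== PRECONDITION & SPEC =====
def Spec_clean_email (email : String) (out : String) : Prop := out = clean_email_alt email
instance (email : String) (out : String) : Decidable (Spec_clean_email email out) := by unfold Spec_clean_email; infer_instance

-- ===== CLAIM (what is proved, stated in full; the proofs are below) =====
def Claim_equal_clean_email : Prop := ∀ (email : String), Dom_clean_email email → Spec_clean_email email (clean_email email)

-- ===== LEMMAS AND PROOFS =====

-- replace.go with a single-char pattern is a character map
theorem go_single (c d : Char) (l acc : List Char) (fuel : Nat) (h : l.length ≤ fuel) :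
    PySem.Chars.replace.go [c] [d] fuel l acc
      = acc.reverse ++ l.map (fun x => if x = c then d else x) := by
  induction l generalizing fuel acc with
  | nil =>
    cases fuel <;> simp [PySem.Chars.replace.go]
  | cons c' t ih =>
    cases fuel with
    | zero => simp at h
    | succ f =>
      by_cases hc : c' = c
      · subst hc
        have hp : ([c'].isPrefixOf (c' :: t)) = true := by simp [List.isPrefixOf]
        simp only [PySem.Chars.replace.go, hp, if_true, List.length_cons,
          List.length_nil, Nat.zero_add, List.drop_succ_cons, List.drop_zero,
          List.reverse_cons, List.reverse_nil, List.nil_append, List.singleton_append]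
        rw [ih (d :: acc) f (by simpa using h)]
        simp
      · have hp : ([c].isPrefixOf (c' :: t)) = false := by
          simp only [List.isPrefixOf, Bool.and_true,
            beq_eq_false_iff_ne]
          exact fun e => hc e.symm
        simp only [PySem.Chars.replace.go, hp, Bool.false_eq_true, if_false]
        rw [ih (c' :: acc) f (by simpa using h)]
        simp [hc]

theorem replace_single (s t : String) (c : Char) (ht : t.toList = [c]) :
    (PySem.Str.replace s t "_").toList
      = s.toList.map (fun x => if x = c then '_' else x) := by
  simp only [PySem.Str.replace, PySem.Chars.replace, ht]
  have h1 : ("_" : String).toList = ['_'] := rfl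
  rw [h1]
  simp only [List.isEmpty_cons, if_neg Bool.false_ne_true]
  rw [go_single c '_' s.toList [] s.toList.length (le_refl _)]
  simp

-- folding single-char replaces (with non-special '_') over a list is one membership pass
theorem foldl_replace (LS : List String) (s : String)
    (h : ∀ t ∈ LS, t.toList.length = 1 ∧ '_' ∉ t.toList) :
    (LS.foldl (fun e t => PySem.Str.replace e t "_") s).toList
      = s.toList.map (fun x => if LS.any (fun t => t.toList = [x]) then '_' else x) := by
  induction LS generalizing s with
  | nil => simp
  | cons t LS ih =>
    obtain ⟨hlen, hund⟩ := h t (List.mem_cons_self)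
    obtain ⟨c, htc⟩ := List.length_eq_one_iff.mp hlen
    have hcne : c ≠ '_' := by
      intro e; exact hund (by rw [htc, e]; exact List.mem_cons_self)
    rw [List.foldl_cons, ih _ (fun t' ht' => h t' (List.mem_cons_of_mem _ ht')),
      replace_single s t c htc, List.map_map]
    apply List.map_congr_left
    intro x _
    simp only [Function.comp]
    by_cases hx : x = c
    · subst hx
      have hno : (LS.any fun t' => t'.toList = ['_']) = false := by
        simp only [List.any_eq_false, decide_eq_true_eq]
        intro t' ht' he
        obtain ⟨hlen', hund'⟩ := h t' (List.mem_cons_of_mem _ ht')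
        exact hund' (by rw [he]; exact List.mem_cons_self)
      have hyes : (List.any (t :: LS) fun t' => t'.toList = [x]) = true := by
        simp [List.any_cons, htc]
      simp [hno, hyes]
    · have ht' : (decide (t.toList = [x])) = false := by
        simp only [htc, decide_eq_false_iff_not, List.cons.injEq, and_true]
        exact fun e => hx e.symm
      simp [List.any_cons, hx, ht']

-- the two membership tests agree on every character
theorem cond_eq (x : Char) :
    (special_chars.any fun t => t.toList = [x]) = PySem.Set.contains specials_alt x := by
  have hs : specials_alt =
      ['!', '#', '$', '%', '^', '&', '*', '(', ')', '=', '+', '{', '}', '[', ']',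
       '|', '\\', ':', ';', '"', '\'', '<', '>', ',', '.', '?', '/', ' '] := by decide
  have key : ∀ (t : String) (c : Char), t.toList = [c] →
      (decide (t.toList = [x]) = (c == x)) := by
    intro t c h
    rw [h]
    by_cases e : c = x <;> simp [e]
  simp only [special_chars, List.any_cons, List.any_nil]
  rw [key "!" '!' rfl, key "#" '#' rfl, key "$" '$' rfl, key "%" '%' rfl,
    key "^" '^' rfl, key "&" '&' rfl, key "*" '*' rfl, key "(" '(' rfl,
    key ")" ')' rfl, key "=" '=' rfl, key "+" '+' rfl, key "{" '{' rfl,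
    key "}" '}' rfl, key "[" '[' rfl, key "]" ']' rfl, key "|" '|' rfl,
    key "\\" '\\' rfl, key ":" ':' rfl, key ";" ';' rfl, key "\"" '"' rfl,
    key "'" '\'' rfl, key "<" '<' rfl, key ">" '>' rfl, key "," ',' rfl,
    key "." '.' rfl, key "?" '?' rfl, key "/" '/' rfl, key " " ' ' rfl, hs]
  simp only [PySem.Set.contains]
  rw [← List.any_beq']
  simp [List.any_cons]

-- ===== VERDICT (by name: the statement is the Claim_ definition above) =====
theorem clean_email_spec : Claim_equal_clean_email := by
  intro email _
  unfold Spec_clean_email clean_email clean_email_alt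
  apply String.toList_injective
  rw [foldl_replace _ _ (by decide)]
  simp only [String.toList_ofList]
  apply List.map_congr_left
  intro x _
  rw [cond_eq]
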